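-- pv_equiv track=rewrite | github.com/Inna17S/python_cours | hangman.py | match_with_gaps
-- ===== SOURCE A (Python) =====
-- def match_with_gaps(my_word, other_word):
--     '''
--     my_word: string with _ characters, current guess of secret word
--     other_word: string, regular English word
--     returns: boolean, True if all the actual letters of my_word match the
--         corresponding letters of other_word, or the letter is the special symbol
--         _ , and my_word and other_word are of the same length;
--         False otherwise:
--     '''
--     my_word = list(my_word.replace(' ', ''))
--     other_word = list(other_word )
--
--     if len(my_word) != len(other_word):
--       return False
--     else:
--       for i in range (len(my_word)):
--         if my_word[i] != '_' and my_word [i] != other_word [i]: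
--           return False
--       for i in range(len(my_word)):
--         f = i + 1
--         for f in range(len(my_word)):
--           if other_word [i] == other_word [f] and my_word [i] != my_word [f]:
--             return False
--     return True
-- ===== SOURCE B (Python) =====
-- def match_with_gaps(my_word, other_word):
--     my = my_word.replace(' ', '')
--     if len(my) != len(other_word):
--         return False
--     seen = {}
--     for m, o in zip(my, other_word):
--         if m != '_' and m != o:
--             return False
--         if seen.setdefault(o, m) != m:
--             return False
--     return True
-- ===== Notes on version B (the rewrite author's own statement) =====
-- stated objective: faster
-- what changed: replaced the O(n^2) all-pairs consistency scan over other_word's letters by a single pass over zip(my,other) with a dict mapping each letter of other_word to its first guess letter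
import Mathlib
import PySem

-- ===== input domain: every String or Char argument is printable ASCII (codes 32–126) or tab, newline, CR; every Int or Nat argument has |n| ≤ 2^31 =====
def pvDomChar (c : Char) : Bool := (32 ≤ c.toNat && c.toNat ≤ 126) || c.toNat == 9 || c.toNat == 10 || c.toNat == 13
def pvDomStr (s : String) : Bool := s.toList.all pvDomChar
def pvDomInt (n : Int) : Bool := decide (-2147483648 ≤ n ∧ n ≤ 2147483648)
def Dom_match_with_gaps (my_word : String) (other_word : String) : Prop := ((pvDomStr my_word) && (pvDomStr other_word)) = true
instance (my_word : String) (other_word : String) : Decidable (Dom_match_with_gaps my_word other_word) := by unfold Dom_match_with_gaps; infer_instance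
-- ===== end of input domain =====

-- B replaces A's quadratic all-pairs consistency scan by one pass over zip with a dict of first occurrences (asymptotically faster; return value proved equal).

-- ===== PORT A =====
-- A, step for step: strip spaces from my_word, listify; length check; first index loop
-- (early return False = .all of the negated condition); then the nested index loops.
def match_with_gaps (my_word : String) (other_word : String) : Bool :=
  let my := (PySem.Str.replace my_word " " "").toList
  let ot := other_word.toList
  if my.length ≠ ot.length then false
  else
    if ¬ ((PySem.List.pyRange 0 my.length 1).all fun i =>
        ¬ (PySem.List.pyGetD my i ' ' ≠ '_' ∧ PySem.List.pyGetD my i ' ' ≠ PySem.List.pyGetD ot i ' ')) then false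
    else if ¬ ((PySem.List.pyRange 0 my.length 1).all fun i =>
        (PySem.List.pyRange 0 my.length 1).all fun f =>
          ¬ (PySem.List.pyGetD ot i ' ' = PySem.List.pyGetD ot f ' ' ∧ PySem.List.pyGetD my i ' ' ≠ PySem.List.pyGetD my f ' ')) then false
    else true

-- ===== PORT B =====
-- B's loop body: per pair (m, o), check the guess letter, then dict consistency via setdefault.
def mwgLoop (ps : List (Char × Char)) (seen : PySem.Dict Char Char) : Bool :=
  match ps with
  | [] => true
  | (m, o) :: rest =>
    if m ≠ '_' ∧ m ≠ o then false
    else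
      let seen' := seen.setdefault o m
      if seen'.getD o m ≠ m then false
      else mwgLoop rest seen'

def match_with_gaps_alt (my_word : String) (other_word : String) : Bool :=
  let my := (PySem.Str.replace my_word " " "").toList
  let ot := other_word.toList
  if my.length ≠ ot.length then false
  else mwgLoop (my.zip ot) PySem.Dict.empty

-- ===== PRECONDITION & SPEC =====
def Spec_match_with_gaps (my_word : String) (other_word : String) (out : Bool) : Prop := out = match_with_gaps_alt my_word other_word
instance (my_word : String) (other_word : String) (out : Bool) : Decidable (Spec_match_with_gaps my_word other_word out) := by unfold Spec_match_with_gaps; infer_instance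

-- ===== CLAIM (what is proved, stated in full; the proofs are below) =====
def Claim_equal_match_with_gaps : Prop := ∀ (my_word : String) (other_word : String), Dom_match_with_gaps my_word other_word → Spec_match_with_gaps my_word other_word (match_with_gaps my_word other_word)

-- ===== LEMMAS AND PROOFS =====

-- mwgLoop characterised: all pairs pass the letter check, pairs are mutually consistent,
-- and every pair is consistent with what `seen` already recorded.
theorem mwgLoop_iff (ps : List (Char × Char)) (seen : PySem.Dict Char Char) :
    mwgLoop ps seen = true ↔
      (∀ p ∈ ps, p.1 = '_' ∨ p.1 = p.2) ∧
      (∀ p ∈ ps, ∀ q ∈ ps, p.2 = q.2 → p.1 = q.1) ∧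
      (∀ p ∈ ps, ∀ m0, seen.get? p.2 = some m0 → p.1 = m0) := by
  induction ps generalizing seen with
  | nil => simp [mwgLoop]
  | cons hd rest ih =>
    obtain ⟨m, o⟩ := hd
    rw [mwgLoop]
    have hget : (seen.setdefault o m).getD o m = (seen.get? o).getD m := by
      rw [PySem.Dict.getD_setdefault_self]; rfl
    by_cases h1 : m ≠ '_' ∧ m ≠ o
    · simp only [if_pos h1]
      constructor
      · intro h; cases h
      · rintro ⟨hA, -, -⟩
        rcases hA (m, o) (List.mem_cons_self) with h | h <;> exact absurd h (by tauto)
    · rw [if_neg h1]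
      by_cases h2 : (seen.setdefault o m).getD o m ≠ m
      · simp only [if_pos h2]
        constructor
        · intro h; cases h
        · rintro ⟨-, -, hC⟩
          exfalso
          apply h2
          rw [hget]
          rcases h : seen.get? o with _ | m0
          · rfl
          · simpa using (hC (m, o) (List.mem_cons_self) m0 h).symm
      · rw [if_neg h2]
        push_neg at h2
        have h2' : (seen.get? o).getD m = m := by rw [← hget]; exact h2
        have hnm : ∀ m1, seen.get? o = some m1 → m1 = m := by
          intro m1 h; rw [h] at h2'; simpa using h2'
        have hset : (seen.setdefault o m).get? o = some m := by
          rw [PySem.Dict.get?_setdefault_self, h2']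
        rw [ih]
        constructor
        · rintro ⟨hA, hB, hC⟩
          have hfirst : ∀ p ∈ rest, p.2 = o → p.1 = m := by
            intro p hp hpo
            exact hC p hp m (by rw [hpo]; exact hset)
          refine ⟨?_, ?_, ?_⟩
          · intro p hp
            rcases List.mem_cons.mp hp with rfl | hp
            · by_cases hm : m = '_'
              · exact Or.inl hm
              · exact Or.inr (by tauto)
            · exact hA p hp
          · intro p hp q hq hpq
            rcases List.mem_cons.mp hp with rfl | hp <;> rcases List.mem_cons.mp hq with rfl | hq
            · rfl
            · exact (hfirst q hq hpq.symm).symm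
            · exact hfirst p hp hpq
            · exact hB p hp q hq hpq
          · intro p hp m0 hm0
            rcases List.mem_cons.mp hp with rfl | hp
            · exact (hnm m0 hm0).symm
            · by_cases hpo : p.2 = o
              · rw [hpo] at hm0
                rw [hnm m0 hm0]
                exact hfirst p hp hpo
              · exact hC p hp m0 (by rw [PySem.Dict.get?_setdefault_of_ne seen m hpo]; exact hm0)
        · rintro ⟨hA, hB, hC⟩
          refine ⟨fun p hp => hA p (List.mem_cons_of_mem _ hp),
                  fun p hp q hq => hB p (List.mem_cons_of_mem _ hp) q (List.mem_cons_of_mem _ hq), ?_⟩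
          intro p hp m0 hm0
          by_cases hpo : p.2 = o
          · rw [hpo, hset] at hm0
            injection hm0 with hm0
            rw [← hm0]
            exact hB p (List.mem_cons_of_mem _ hp) (m, o) (List.mem_cons_self) hpo
          · rw [PySem.Dict.get?_setdefault_of_ne seen m hpo] at hm0
            exact hC p (List.mem_cons_of_mem _ hp) m0 hm0

set_option maxHeartbeats 1600000 in
theorem match_with_gaps_spec : Claim_equal_match_with_gaps := by
  intro my_word other_word _
  unfold Spec_match_with_gaps match_with_gaps match_with_gaps_alt
  set my := (PySem.Str.replace my_word " " "").toList with hmy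
  set ot := other_word.toList with hot
  by_cases hlen : my.length ≠ ot.length
  · simp only [if_pos hlen]
  · simp only [if_neg hlen]
    push_neg at hlen
    rw [Bool.eq_iff_iff]
    have hzip : ∀ p : Char × Char, p ∈ my.zip ot ↔
        ∃ i : Nat, ∃ h : i < my.length, p = (my[i]'h, ot[i]'(by omega)) := by
      intro p
      constructor
      · intro hp
        obtain ⟨i, hi, hpi⟩ := List.mem_iff_getElem.mp hp
        rw [List.length_zip, hlen, Nat.min_self] at hi
        refine ⟨i, by omega, ?_⟩
        rw [← hpi, List.getElem_zip]
      · rintro ⟨i, hi, rfl⟩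
        apply List.mem_iff_getElem.mpr
        refine ⟨i, by rw [List.length_zip, hlen, Nat.min_self]; omega, ?_⟩
        rw [List.getElem_zip]
    have hgetd : ∀ (xs : List Char) (i : Int) (h0 : 0 ≤ i) (h1 : i < (xs.length : Int)),
        PySem.List.pyGetD xs i ' ' = xs[i.toNat]'(by omega) :=
      fun xs i h0 h1 => PySem.List.pyGetD_eq_getElem xs ' ' h0 h1
    constructor
    · -- A = true → B = true
      intro hA
      split_ifs at hA with c1 c2
      rw [mwgLoop_iff]
      simp only [List.all_eq_true, PySem.List.mem_pyRange_one, decide_eq_true_eq] at c1 c2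
      refine ⟨?_, ?_, by intro p hp m0 hm0; simp [PySem.Dict.get?, PySem.Dict.empty] at hm0⟩
      · rintro p hp
        obtain ⟨i, hi, rfl⟩ := (hzip p).mp hp
        have := c1 i ⟨by omega, by omega⟩
        rw [hgetd my i (by omega) (by omega), hgetd ot i (by omega) (by omega)] at this
        simp only [Int.toNat_natCast] at this
        push_neg at this
        by_cases h : my[i] = '_'
        · exact Or.inl h
        · exact Or.inr (this h)
      · rintro p hp q hq hpq
        obtain ⟨i, hi, rfl⟩ := (hzip p).mp hp
        obtain ⟨f, hf, rfl⟩ := (hzip q).mp hq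
        have := c2 i ⟨by omega, by omega⟩ f ⟨by omega, by omega⟩
        rw [hgetd my i (by omega) (by omega), hgetd ot i (by omega) (by omega),
            hgetd my f (by omega) (by omega), hgetd ot f (by omega) (by omega)] at this
        simp only [Int.toNat_natCast] at this
        push_neg at this
        exact this hpq
    · -- B = true → A = true
      intro hB
      rw [mwgLoop_iff] at hB
      obtain ⟨hA1, hA2, -⟩ := hB
      have c1 : ∀ i : Int, 0 ≤ i ∧ i < (my.length : Int) →
          ¬ (PySem.List.pyGetD my i ' ' ≠ '_' ∧ PySem.List.pyGetD my i ' ' ≠ PySem.List.pyGetD ot i ' ') := by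
        intro i hi
        rw [hgetd my i hi.1 hi.2, hgetd ot i hi.1 (by omega)]
        have := hA1 (my[i.toNat]'(by omega), ot[i.toNat]'(by omega))
          ((hzip _).mpr ⟨i.toNat, by omega, rfl⟩)
        tauto
      have c2 : ∀ i : Int, 0 ≤ i ∧ i < (my.length : Int) → ∀ f : Int, 0 ≤ f ∧ f < (my.length : Int) →
          ¬ (PySem.List.pyGetD ot i ' ' = PySem.List.pyGetD ot f ' ' ∧ PySem.List.pyGetD my i ' ' ≠ PySem.List.pyGetD my f ' ') := by
        intro i hi f hf
        rw [hgetd my i hi.1 hi.2, hgetd ot i hi.1 (by omega),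
            hgetd my f hf.1 hf.2, hgetd ot f hf.1 (by omega)]
        have := hA2 (my[i.toNat]'(by omega), ot[i.toNat]'(by omega))
          ((hzip _).mpr ⟨i.toNat, by omega, rfl⟩)
          (my[f.toNat]'(by omega), ot[f.toNat]'(by omega))
          ((hzip _).mpr ⟨f.toNat, by omega, rfl⟩)
        tauto
      rw [if_neg (by simp only [not_not, List.all_eq_true, PySem.List.mem_pyRange_one, decide_eq_true_eq]; exact c1),
          if_neg (by simp only [not_not, List.all_eq_true, PySem.List.mem_pyRange_one, decide_eq_true_eq]; exact c2)]
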